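-- pv_equiv track=rewrite | github.com/ChaminduNevandith/Legal_document_Dataset_and_Model_tranning | scripts/preprocess_extraordinary_gazettes.py | drop_until_nth_newline
-- ===== SOURCE A (Python) =====
-- def drop_until_nth_newline(text: str, n: int = 4) -> str:
--
--     if n <= 0:
--         return text
--     count = 0
--     for i, ch in enumerate(text):
--         if ch == "\n":
--             count += 1
--             if count == n:
--
--                 return text[i+1:]
--     return text
-- ===== SOURCE B (Python) =====
-- def drop_until_nth_newline(text: str, n: int = 4) -> str:
--     if n <= 0:
--         return text
--     pos = -1
--     for _ in range(n):
--         pos = text.find('\n', pos + 1)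
--         if pos == -1:
--             return text
--     return text[pos + 1:]
-- ===== Notes on version B (the rewrite author's own statement) =====
-- stated objective: faster
-- what changed: Replaced A's per-character enumerate scan with a running newline counter by a loop of at most n str.find calls that jump directly between newline positions.
import Mathlib
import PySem

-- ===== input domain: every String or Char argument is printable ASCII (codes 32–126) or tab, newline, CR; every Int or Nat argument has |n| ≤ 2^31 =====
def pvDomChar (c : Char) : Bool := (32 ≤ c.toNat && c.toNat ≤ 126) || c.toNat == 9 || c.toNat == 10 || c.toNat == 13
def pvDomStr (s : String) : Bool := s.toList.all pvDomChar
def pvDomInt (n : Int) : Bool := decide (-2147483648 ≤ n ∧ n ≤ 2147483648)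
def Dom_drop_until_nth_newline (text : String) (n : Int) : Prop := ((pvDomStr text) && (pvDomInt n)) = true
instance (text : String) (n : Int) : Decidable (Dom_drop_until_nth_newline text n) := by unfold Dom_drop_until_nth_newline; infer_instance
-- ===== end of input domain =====

-- B replaces A's per-character scan with a running newline count by a loop of at most n
-- str.find calls that jump between newline positions (objective: faster, constant factor).

-- ===== PORT A =====
-- A's for-loop over enumerate(text): count newlines; on the nth, return text[i+1:].
def dropA_go (text : String) (n : Int) : List (Int × Char) → Int → String
  | [], _ => text
  | (i, ch) :: rest, count =>
    if ch = '\n' then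
      if count + 1 = n then PySem.Str.slice text (some (i + 1)) none
      else dropA_go text n rest (count + 1)
    else dropA_go text n rest count

def drop_until_nth_newline (text : String) (n : Int) : String :=
  if n ≤ 0 then text
  else dropA_go text n (PySem.List.enumerate text.toList 0) 0

-- ===== PORT B =====
-- B's 'for _ in range(n)' loop: pos = text.find('\n', pos+1); early return on -1.
def dropB_go (text : String) : Nat → Int → String
  | 0, pos => PySem.Str.slice text (some (pos + 1)) none
  | k + 1, pos =>
    let p := PySem.Str.findFrom text "\n" (pos + 1) none
    if p = -1 then text else dropB_go text k p

def drop_until_nth_newline_alt (text : String) (n : Int) : String :=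
  if n ≤ 0 then text
  else dropB_go text n.toNat (-1)

-- ===== PRECONDITION & SPEC =====
def Spec_drop_until_nth_newline (text : String) (n : Int) (out : String) : Prop := out = drop_until_nth_newline_alt text n
instance (text : String) (n : Int) (out : String) : Decidable (Spec_drop_until_nth_newline text n out) := by unfold Spec_drop_until_nth_newline; infer_instance

-- ===== CLAIM (what is proved, stated in full; the proofs are below) =====
def Claim_equal_drop_until_nth_newline : Prop := ∀ (text : String) (n : Int), Dom_drop_until_nth_newline text n → Spec_drop_until_nth_newline text n (drop_until_nth_newline text n)

-- ===== LEMMAS AND PROOFS =====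

-- Reference function: suffix after the k-th newline of l, if it exists.
def nthNL : Nat → List Char → Option (List Char)
  | 0, l => some l
  | _ + 1, [] => none
  | k + 1, c :: rest => if c = '\n' then nthNL k rest else nthNL (k + 1) rest

lemma nthNL_of_not_mem (k : Nat) (l : List Char) (h : '\n' ∉ l) :
    nthNL (k + 1) l = none := by
  induction l with
  | nil => rfl
  | cons c rest ih =>
    simp only [List.mem_cons, not_or] at h
    simp [nthNL, Ne.symm h.1, ih h.2]

lemma nthNL_append (k : Nat) (l₁ l₂ : List Char) (h : '\n' ∉ l₁) :
    nthNL (k + 1) (l₁ ++ '\n' :: l₂) = nthNL k l₂ := by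
  induction l₁ with
  | nil => simp [nthNL]
  | cons c rest ih =>
    simp only [List.mem_cons, not_or] at h
    simp [nthNL, Ne.symm h.1, ih h.2]

lemma dropA_go_spec (text : String) (n : Int) :
    ∀ (l : List Char) (s : Nat) (count : Int), 0 ≤ count → count < n →
      l = text.toList.drop s →
      dropA_go text n (PySem.List.enumerate l (s : Int)) count
        = (nthNL (n - count).toNat l).elim text String.ofList := by
  intro l
  induction l with
  | nil =>
    intro s count h0 hlt _
    obtain ⟨m, hm⟩ : ∃ m, (n - count).toNat = m + 1 :=
      ⟨(n - count).toNat - 1, by omega⟩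
    simp [PySem.List.enumerate, dropA_go, hm, nthNL]
  | cons c rest ih =>
    intro s count h0 hlt hl
    have hrest : rest = text.toList.drop (s + 1) := by
      rw [← List.tail_drop, ← hl]; rfl
    obtain ⟨m, hm⟩ : ∃ m, (n - count).toNat = m + 1 :=
      ⟨(n - count).toNat - 1, by omega⟩
    rw [PySem.List.enumerate_cons]
    by_cases hc : c = '\n'
    · by_cases hn : count + 1 = n
      · have hm0 : (n - count).toNat = 1 := by omega
        have hcast : ((s : Int) + 1) = ((s + 1 : Nat) : Int) := by push_cast; ring
        simp only [dropA_go, hc, hn, hm0, nthNL, if_true]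
        simp only [Option.elim]
        apply String.toList_inj.mp
        rw [PySem.Str.toList_slice, hcast, PySem.Chars.slice_eq_listSlice,
          PySem.List.slice_from_natCast, ← hrest]
        simp
      · have : (s : Int) + 1 = ((s + 1 : Nat) : Int) := by push_cast; ring
        have hrec := ih (s + 1) (count + 1) (by omega) (by omega) hrest
        rw [this] at *
        simp only [dropA_go, hc, if_neg hn, hrec]
        have : (n - (count + 1)).toNat = m := by omega
        simp [hm, this, nthNL]
    · have : (s : Int) + 1 = ((s + 1 : Nat) : Int) := by push_cast; ring
      have hrec := ih (s + 1) count h0 hlt hrest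
      rw [this] at *
      simp only [dropA_go, if_neg hc, hrec]
      simp [hm, nthNL, hc]

lemma singleton_infix_iff (c : Char) (l : List Char) : [c] <:+: l ↔ c ∈ l := by
  constructor
  · rintro ⟨p, q, rfl⟩; simp
  · intro h
    obtain ⟨p, q, rfl⟩ := List.mem_iff_append.mp h
    exact ⟨p, q, by simp⟩

lemma dropB_go_spec (text : String) :
    ∀ (k : Nat) (s : Nat), s ≤ text.toList.length →
      dropB_go text k ((s : Int) - 1) = (nthNL k (text.toList.drop s)).elim text String.ofList := by
  intro k
  induction k with
  | zero =>
    intro s _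
    apply String.toList_inj.mp
    simp only [dropB_go, nthNL, Option.elim]
    rw [PySem.Str.toList_slice]
    have : ((s : Int) - 1 + 1) = ((s : Nat) : Int) := by ring
    rw [this, PySem.Chars.slice_eq_listSlice, PySem.List.slice_from_natCast]
    simp
  | succ k ih =>
    intro s hs
    have hstep : (s : Int) - 1 + 1 = ((s : Nat) : Int) := by ring
    simp only [dropB_go, hstep, PySem.Str.findFrom_eq]
    rw [PySem.Chars.findFrom_natCast text.toList "\n".toList s hs]
    simp only [show ("\n".toList : List Char) = ['\n'] from rfl]
    by_cases hfind : PySem.Chars.find (text.toList.drop s) ['\n'] = -1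
    · have hmem : '\n' ∉ text.toList.drop s := by
        rw [PySem.Chars.find_eq_neg_one_iff, singleton_infix_iff] at hfind
        exact hfind
      simp [hfind, nthNL_of_not_mem k _ hmem]
    · rw [if_neg hfind]
      have hpos : 0 ≤ PySem.Chars.find (text.toList.drop s) ['\n'] := by
        have := PySem.Chars.neg_one_le_find (text.toList.drop s) ['\n']
        omega
      obtain ⟨hpre, hmin⟩ := PySem.Chars.find_spec hpos
      set j := (PySem.Chars.find (text.toList.drop s) ['\n']).toNat with hj
      have hfj : PySem.Chars.find (text.toList.drop s) ['\n'] = (j : Int) := by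
        rw [hj, Int.toNat_of_nonneg hpos]
      have hdlen : (text.toList.drop s).length = text.toList.length - s :=
        List.length_drop
      have hjlt : j < (text.toList.drop s).length := by
        rcases hpre with ⟨q, hq⟩
        have := congrArg List.length hq
        simp only [List.length_append, List.length_drop, List.length_cons] at this
        omega
      have hdropj : (text.toList.drop s).drop j
          = '\n' :: (text.toList.drop s).drop (j + 1) := by
        have h0 : (text.toList.drop s).drop j
            = '\n' :: ((text.toList.drop s).drop j).tail := by
          rcases hpre with ⟨q, hq⟩
          rw [← hq]
          rfl
        rw [h0, List.tail_drop]
      have hnomem : '\n' ∉ (text.toList.drop s).take j := by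
        intro hmem
        obtain ⟨i, hi, hget⟩ := List.mem_take_iff_getElem.mp hmem
        apply hmin i (by omega)
        refine ⟨(text.toList.drop s).drop (i + 1), ?_⟩
        have hcons : (text.toList.drop s).drop i
            = (text.toList.drop s)[i] :: (text.toList.drop s).drop (i + 1) :=
          (List.drop_eq_getElem_cons (by omega)).trans rfl
        rw [hcons, hget]
        rfl
      rw [hfj]
      have hcast : (s : Int) + (j : Int) = ((s + j + 1 : Nat) : Int) - 1 := by
        push_cast
        ring
      rw [hcast, if_neg (show ¬ ((s + j + 1 : Nat) : Int) - 1 = -1 by push_cast; omega)]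
      have hs' : s + j + 1 ≤ text.toList.length := by omega
      rw [ih (s + j + 1) hs']
      congr 1
      have hsplit : text.toList.drop s
          = (text.toList.drop s).take j ++ '\n' :: (text.toList.drop (s + j + 1)) := by
        conv_lhs => rw [← List.take_append_drop j (text.toList.drop s)]
        rw [hdropj, List.drop_drop]
        ring_nf
      rw [hsplit, nthNL_append k _ _ hnomem]

-- ===== VERDICT (by name: the statement is the Claim_ definition above) =====
theorem drop_until_nth_newline_spec : Claim_equal_drop_until_nth_newline := by
  intro text n _
  unfold Spec_drop_until_nth_newline drop_until_nth_newline drop_until_nth_newline_alt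
  by_cases hn : n ≤ 0
  · simp [hn]
  · rw [if_neg hn, if_neg hn]
    have hA := dropA_go_spec text n text.toList 0 0 le_rfl (by omega) (by simp)
    have hB := dropB_go_spec text n.toNat 0 (by omega)
    simp only [Nat.cast_zero, List.drop_zero] at hA hB
    rw [hA]
    have : ((0 : Int) - 1) = (-1 : Int) := by ring
    rw [this] at hB
    rw [hB]
    have : (n - 0).toNat = n.toNat := by omega
    rw [this]
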